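-- pv_equiv track=rewrite | github.com/Mmorami/MIT_Intro_to_CS_and_python_6.0001 | tries.py | solution
-- ===== SOURCE A (Python) =====
-- def decimal_to_binary(A):
--     # creating an empty list for the binary values of the numbers
--     A_bin = []
--     # transforming the int to binary strings with no trailing 0s and appending them to A_bin
--     for num in A:
--         binary_num = format(num, 'b')
--         A_bin.append(binary_num)
--     return A_bin
--
-- def check_count_for_specific_bit(A_bin, A_bin_copy, bit_pos, max_count):
--     # initiating count for specific bit
--     bit_count = 0
--     # iterating over each number in the list
--     for num in A_bin:
--         # if the current bit we are checking is not needed to represent the number, just move on to the next number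
--         if bit_pos < -len(num):
--             A_bin_copy.remove(num)
--         elif num[bit_pos] == '1':
--             bit_count += 1
--     if bit_count > max_count:
--         max_count = bit_count
--     A_bin = A_bin_copy.copy()
--     return A_bin, max_count
--
-- def solution(A):
--     # sorting the list in des order
--     A.sort(reverse=True)
--     # count initiation
--     max_count = 0
--     A_bin = decimal_to_binary(A)
--     # determining the max bit number needed to be checked
--     longest_bin = len(max(A_bin, key=len))
--     # make a hard copy of A_bin
--     A_bin_copy = A_bin.copy()
--     # iterating over individual bits
--     for bit_pos in range(-1, -longest_bin-1, -1):
--         A_bin, max_count = check_count_for_specific_bit(A_bin, A_bin_copy, bit_pos, max_count)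
--     return max_count
-- ===== SOURCE B (Python) =====
-- def solution(A):
--     counts = {}
--     for num in A:
--         v = abs(num)
--         p = 0
--         while v:
--             if v & 1:
--                 counts[p] = counts.get(p, 0) + 1
--             v >>= 1
--             p += 1
--     return max(counts.values(), default=0)
-- ===== Notes on version B (the rewrite author's own statement) =====
-- stated objective: faster
-- what changed: B replaces A's in-place sort, binary-string conversion table and per-bit-position scans over a shrinking list (with O(n) list.remove housekeeping) by a single pass over the integers that accumulates set-bit counts per bit position in a dict, then takes the max of the counts.
import Mathlib
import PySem

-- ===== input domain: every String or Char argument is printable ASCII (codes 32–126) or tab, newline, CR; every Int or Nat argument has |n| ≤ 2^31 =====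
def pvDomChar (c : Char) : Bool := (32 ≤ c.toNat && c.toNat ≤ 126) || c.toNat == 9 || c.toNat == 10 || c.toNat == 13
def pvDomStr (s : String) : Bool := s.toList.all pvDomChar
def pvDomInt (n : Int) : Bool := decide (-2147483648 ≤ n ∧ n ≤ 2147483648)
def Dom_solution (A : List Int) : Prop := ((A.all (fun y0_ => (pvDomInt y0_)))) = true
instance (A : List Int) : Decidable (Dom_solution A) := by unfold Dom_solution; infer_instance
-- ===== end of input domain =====

-- ===== PORT A =====
-- B replaces A's sort + binary-string table + per-bit list scans (with list.remove
-- housekeeping) by one pass accumulating per-bit-position counts in a dict; measured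
-- faster on large inputs.  NOTE: Python A sorts its argument in place (A.sort()); the
-- equivalence proved here is about the RETURN value only.

-- helper `decimal_to_binary` of A
def decimalToBinary (A : List Int) : List (List Char) :=
  A.foldl (fun acc num => acc ++ [PySem.Int.toBinChars num]) []

-- helper `check_count_for_specific_bit` of A; the mutated A_bin_copy is threaded as
-- the first component of the returned pair (Python mutates it in place).
-- `list.remove` would raise ValueError when the element is absent (remove? = none);
-- that never happens here since A_bin_copy always contains every element of A_bin —
-- the `.getD st.1` fallback is provably dead code.
def checkCountForSpecificBit (Abin copy : List (List Char)) (bitPos : Int) (maxCount : Int) :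
    List (List Char) × Int :=
  let st := Abin.foldl (fun (st : List (List Char) × Int) num =>
    if bitPos < -(num.length : Int) then
      ((PySem.List.remove? st.1 num).getD st.1, st.2)
    else if PySem.List.pyGet? num bitPos == some '1' then (st.1, st.2 + 1)
    else st) (copy, (0 : Int))
  (st.1, if st.2 > maxCount then st.2 else maxCount)

-- `max(A_bin, key=len)` raises ValueError on an empty list: A = [] is excluded by
-- Pre_solution, so the `.getD 0` default is never used inside the claim.
def solution (A : List Int) : Int :=
  let As := PySem.List.sorted A (fun x => x) true
  let Abin := decimalToBinary As
  let longest : Nat := ((PySem.List.max? Abin (fun s => s.length)).map List.length).getD 0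
  let st := (PySem.List.pyRange (-1) (-(longest : Int) - 1) (-1)).foldl
    (fun (st : List (List Char) × List (List Char) × Int) bitPos =>
      let r := checkCountForSpecificBit st.1 st.2.1 bitPos st.2.2
      (r.1, r.1, r.2)) (Abin, Abin, (0 : Int))
  st.2.2

-- ===== PORT B =====
-- the inner `while v:` loop of B
def solnAltAddBits (counts : PySem.Dict Int Int) (v : Nat) (p : Int) : PySem.Dict Int Int :=
  if v = 0 then counts
  else solnAltAddBits
    (if v &&& 1 = 1 then counts.modify p 0 (· + 1) else counts) (v >>> 1) (p + 1)
termination_by v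
decreasing_by simpa [Nat.shiftRight_one] using Nat.div_lt_self (Nat.pos_of_ne_zero (by assumption)) one_lt_two

def solution_alt (A : List Int) : Int :=
  let counts := A.foldl (fun d num => solnAltAddBits d num.natAbs 0) PySem.Dict.empty
  PySem.List.maxD counts.values (fun x => x) 0

-- ===== PRECONDITION & SPEC =====
-- Pre_ excludes only the empty list, on which A's `max(A_bin, key=len)` raises ValueError.
def Pre_solution (A : List Int) : Prop := A ≠ []
instance (A : List Int) : Decidable (Pre_solution A) := by unfold Pre_solution; infer_instance
def pvWitness_solution : List Int := [5, -3, 0, 6]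

def Spec_solution (A : List Int) (out : Int) : Prop := out = solution_alt A
instance (A : List Int) (out : Int) : Decidable (Spec_solution A out) := by unfold Spec_solution; infer_instance

-- ===== CLAIM (what is proved, stated in full; the proofs are below) =====
def Claim_equal_solution : Prop := ∀ (A : List Int), Dom_solution A → Pre_solution A → Spec_solution A (solution A)

-- ===== LEMMAS AND PROOFS =====

/-- the number of elements of `A` whose absolute value has bit `p` set (the quantity
both programs maximise over `p`) -/
def binCnt (A : List Int) (p : Nat) : Int := (A.countP (fun a => a.natAbs.testBit p) : Int)

/-- running maximum of `binCnt` over bit positions `0, …, N-1` -/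
def foldMax (A : List Int) (N : Nat) : Int :=
  (List.range N).foldl (fun mc p => max mc (binCnt A p)) 0

lemma binCnt_nonneg (A : List Int) (p : Nat) : 0 ≤ binCnt A p := by
  simp [binCnt]

lemma foldMax_nonneg (A : List Int) (N : Nat) : 0 ≤ foldMax A N := by
  exact (PySem.List.le_foldl_max_int (List.range N) (binCnt A) 0).1

lemma foldMax_le (A : List Int) (N : Nat) (c : Int) (h0 : 0 ≤ c)
    (h : ∀ p < N, binCnt A p ≤ c) : foldMax A N ≤ c := by
  unfold foldMax
  rw [show List.foldl (fun mc p => max mc (binCnt A p)) 0 (List.range N)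
        = List.foldl max 0 ((List.range N).map (binCnt A)) from (List.foldl_map).symm]
  rcases PySem.List.foldl_max_mem ((List.range N).map (binCnt A)) 0 with hm | hm
  · rw [hm]; exact h0
  · obtain ⟨p, hp, he⟩ := List.mem_map.mp hm
    rw [← he]
    exact h p (List.mem_range.mp hp)

lemma le_foldMax (A : List Int) (N p : Nat) (hp : p < N) : binCnt A p ≤ foldMax A N :=
  (PySem.List.le_foldl_max_int (List.range N) (binCnt A) 0).2 p (List.mem_range.mpr hp)

lemma foldMax_ext (A : List Int) (N M : Nat) (hNM : N ≤ M)
    (h : ∀ p, N ≤ p → binCnt A p = 0) : foldMax A M = foldMax A N := by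
  induction M with
  | zero => have : N = 0 := by omega
            subst this; rfl
  | succ M ih =>
    rcases Nat.lt_or_ge N (M+1) with hlt | hge
    · have hNM' : N ≤ M := by omega
      rw [foldMax, List.range_succ, List.foldl_append]
      simp only [List.foldl]
      rw [← foldMax, ih hNM', h M hNM', max_eq_left (foldMax_nonneg A N)]
    · have : N = M + 1 := by omega
      subst this; rfl

-- ===== binary-digit characterisation of Nat.toDigits 2 =====

/-- the list of binary digit characters of `m`, most significant first -/
def bitsOf (m : Nat) : List Char :=
  if m < 2 then [Nat.digitChar m] else bitsOf (m / 2) ++ [Nat.digitChar (m % 2)]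
decreasing_by exact Nat.div_lt_self (by omega) one_lt_two

lemma toDigitsCore_two_eq (f : Nat) : ∀ (n : Nat) (acc : List Char), n < f →
    Nat.toDigitsCore 2 f n acc = bitsOf n ++ acc := by
  induction f with
  | zero => intro n acc h; omega
  | succ f ih =>
    intro n acc h
    rw [Nat.toDigitsCore]
    by_cases h2 : n < 2
    · have : n / 2 = 0 := by omega
      rw [if_pos this, bitsOf, if_pos h2]
      have : n % 2 = n := by omega
      simp [this]
    · have hne : ¬ (n / 2 = 0) := by omega
      rw [if_neg hne, ih (n / 2) _ (by omega)]
      conv_rhs => rw [bitsOf]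
      rw [if_neg h2]
      simp

lemma toDigits_two_eq (n : Nat) : Nat.toDigits 2 n = bitsOf n := by
  simpa using toDigitsCore_two_eq (n+1) n [] (Nat.lt_succ_self n)

lemma bitsOf_length_pos (m : Nat) : 0 < (bitsOf m).length := by
  rw [bitsOf]; split <;> simp

lemma lt_two_pow_bitsOf (m : Nat) : m < 2 ^ (bitsOf m).length := by
  induction m using Nat.strong_induction_on with
  | _ m ih =>
    rw [bitsOf]
    by_cases h2 : m < 2
    · simpa [h2] using h2
    · rw [if_neg h2]
      have := ih (m / 2) (Nat.div_lt_self (by omega) one_lt_two)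
      simp only [List.length_append, List.length_singleton]
      rw [pow_succ]
      omega

lemma bitsOf_reverse (m : Nat) :
    (bitsOf m).reverse
      = (List.range (bitsOf m).length).map (fun p => if m.testBit p then '1' else '0') := by
  induction m using Nat.strong_induction_on with
  | _ m ih =>
    rw [bitsOf]
    by_cases h2 : m < 2
    · rw [if_pos h2]
      interval_cases m <;> simp [Nat.testBit_zero] <;> rfl
    · rw [if_neg h2]
      have ihm := ih (m / 2) (Nat.div_lt_self (by omega) one_lt_two)
      simp only [List.reverse_append, List.reverse_singleton, List.singleton_append,
        List.length_append, List.length_singleton]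
      rw [List.range_succ_eq_map, List.map_cons, List.map_map]
      congr 1
      · have hm2 : m % 2 = 0 ∨ m % 2 = 1 := by omega
        rcases hm2 with h | h <;> simp [Nat.testBit_zero, h, Nat.digitChar]
      · rw [ihm]
        apply List.map_congr_left
        intro p _
        simp [Nat.testBit_succ]

-- ===== per-element characterisation of A's per-bit test =====

/-- A's per-round boolean for one binary string `s` at round `k` (bit position `-1-k`):
the string is long enough AND its `k`-th character from the end is '1' -/
def countedAt (k : Nat) (s : List Char) : Bool :=
  !decide ((-1 - (k : Int)) < -(s.length : Int)) &&
    (PySem.List.pyGet? s (-1 - (k : Int)) == some '1')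

lemma countedAt_false_of_short (k : Nat) (s : List Char) (h : s.length ≤ k) :
    countedAt k s = false := by
  unfold countedAt
  simp only [Bool.and_eq_false_iff]
  left
  simp only [Bool.not_eq_false', decide_eq_true_eq]
  omega

lemma pyGet?_negidx {α : Type} (s : List α) (k : Nat) (h : k < s.length) :
    PySem.List.pyGet? s (-1 - (k : Int)) = s.reverse[k]? := by
  have h1 : ¬ (0 ≤ (-1 - (k : Int))) := by omega
  have h2 : -(s.length : Int) ≤ -1 - (k : Int) := by omega
  have h3 : (-(-1 - (k : Int))).toNat = k + 1 := by omega
  simp only [PySem.List.pyGet?, PySem.List.pyIdx?, if_neg h1, if_pos h2, h3, Option.bind]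
  rw [List.getElem?_reverse h]
  congr 1
  omega

lemma bits_getElem (m k : Nat) (hk : k < (bitsOf m).length) :
    (bitsOf m).reverse[k]? = some (if m.testBit k then '1' else '0') := by
  rw [bitsOf_reverse]
  rw [List.getElem?_map]
  simp [List.getElem?_range hk]

lemma countedAt_true_char (k : Nat) (s : List Char) (h : k < s.length) :
    countedAt k s = (s.reverse[k]? == some '1') := by
  unfold countedAt
  rw [pyGet?_negidx s k h]
  have : ¬ ((-1 - (k : Int)) < -(s.length : Int)) := by omega
  simp [this]

lemma countedAt_toBinChars (num : Int) (k : Nat) :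
    countedAt k (PySem.Int.toBinChars num) = num.natAbs.testBit k := by
  have hbin : PySem.Int.toBinChars num
      = if num < 0 then '-' :: bitsOf num.natAbs else bitsOf num.natAbs := by
    by_cases hneg : num < 0
    · simp [PySem.Int.toBinChars, hneg, toDigits_two_eq]
    · have : num.toNat = num.natAbs := by omega
      simp [PySem.Int.toBinChars, hneg, toDigits_two_eq, this]
  set m := num.natAbs with hm
  have hLpos := bitsOf_length_pos m
  have hpow := lt_two_pow_bitsOf m
  by_cases hk : k < (bitsOf m).length
  · -- the character is a real binary digit of m
    have hks : k < (PySem.Int.toBinChars num).length := by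
      rw [hbin]; split
      · simp only [List.length_cons]; omega
      · omega
    rw [countedAt_true_char _ _ hks, hbin]
    by_cases hneg : num < 0
    · rw [if_pos hneg]
      have : ('-' :: bitsOf m).reverse[k]? = (bitsOf m).reverse[k]? := by
        rw [List.reverse_cons]
        rw [List.getElem?_append_left (by simpa using hk)]
      rw [this, bits_getElem m k hk]
      by_cases ht : m.testBit k <;> simp [ht]
    · rw [if_neg hneg, bits_getElem m k hk]
      by_cases ht : m.testBit k <;> simp [ht]
  · -- k is beyond the digits of m: the bit is 0
    have htb : m.testBit k = false := by
      apply Nat.testBit_lt_two_pow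
      calc m < 2 ^ (bitsOf m).length := hpow
        _ ≤ 2 ^ k := Nat.pow_le_pow_right (by omega) (by omega)
    rw [htb]
    by_cases hneg : num < 0
    · by_cases hk1 : k < (PySem.Int.toBinChars num).length
      · -- only possible when the character is the '-' sign
        rw [countedAt_true_char _ _ hk1, hbin, if_pos hneg]
        have hlen : (PySem.Int.toBinChars num).length = (bitsOf m).length + 1 := by
          rw [hbin, if_pos hneg]; simp
        have hkL : k = (bitsOf m).length := by
          rw [hbin, if_pos hneg] at hk1; simp at hk1; omega
        have hget : ('-' :: bitsOf m).reverse[k]? = some '-' := by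
          rw [List.reverse_cons, List.getElem?_append_right (by simp [hkL])]
          simp [hkL]
        rw [hget]
        rfl
      · rw [countedAt_false_of_short k _ (by omega)]
    · rw [countedAt_false_of_short k _ (by rw [hbin, if_neg hneg]; omega)]


-- ===== the inner loop of checkCountForSpecificBit =====

lemma inner_loop (k : Nat) (L : List (List Char)) : ∀ (done : List (List Char)) (c : Int),
    (∀ d ∈ done, k + 1 ≤ d.length) →
    L.foldl (fun (st : List (List Char) × Int) num =>
        if (-1 - (k : Int)) < -(num.length : Int) then
          ((PySem.List.remove? st.1 num).getD st.1, st.2)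
        else if PySem.List.pyGet? num (-1 - (k : Int)) == some '1' then (st.1, st.2 + 1)
        else st) (done ++ L, c)
      = (done ++ L.filter (fun s => decide (k + 1 ≤ s.length)),
         c + (L.countP (countedAt k) : Int)) := by
  induction L with
  | nil => intro done c _; simp
  | cons num rest ih =>
    intro done c hdone
    rw [List.foldl_cons]
    by_cases hkeep : (-1 - (k : Int)) < -(num.length : Int)
    · -- the string is too short: it is removed from the copy and not counted
      have hshort : num.length ≤ k := by omega
      have hnotmem : num ∉ done := fun hmem => by have := hdone num hmem; omega
      have hmem : num ∈ done ++ num :: rest := by simp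
      have hrem : PySem.List.remove? (done ++ num :: rest) num = some (done ++ rest) := by
        rw [PySem.List.remove?_eq_some_erase _ num hmem, List.erase_append_right _ hnotmem,
          List.erase_cons_head]
      rw [if_pos hkeep]
      simp only [hrem, Option.getD_some]
      rw [ih done c hdone]
      have hc : countedAt k num = false := countedAt_false_of_short k num hshort
      simp [List.filter_cons, List.countP_cons, hc]
      omega
    · -- the string is long enough: kept, and counted iff its bit character is '1'
      have hlong : k + 1 ≤ num.length := by omega
      have hc : countedAt k num
          = (PySem.List.pyGet? num (-1 - (k : Int)) == some '1') := by
        unfold countedAt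
        simp [hkeep]
      have hassoc : done ++ num :: rest = (done ++ [num]) ++ rest := by simp
      have hdone' : ∀ d ∈ done ++ [num], k + 1 ≤ d.length := by
        intro d hd
        rcases List.mem_append.mp hd with h | h
        · exact hdone d h
        · simp at h; subst h; exact hlong
      have ht : decide (k + 1 ≤ num.length) = true := by simpa using hlong
      rw [if_neg hkeep]
      by_cases hch : PySem.List.pyGet? num (-1 - (k : Int)) == some '1'
      · rw [if_pos hch]
        rw [hassoc, ih (done ++ [num]) (c + 1) hdone']
        simp only [List.filter_cons, List.countP_cons, ht, if_pos, hc, hch]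
        apply Prod.ext
        · simp
        · push_cast; ring
      · rw [if_neg hch]
        rw [hassoc, ih (done ++ [num]) c hdone']
        simp only [List.filter_cons, List.countP_cons, ht, if_pos, hc]
        apply Prod.ext
        · simp
        · simp only [] at hch ⊢
          rw [Bool.eq_false_iff.mpr hch]
          simp

-- ===== misc list facts about the filtered table =====

lemma filter_len_step (l : List (List Char)) (k : Nat) :
    (l.filter (fun s => decide (k ≤ s.length))).filter (fun s => decide (k + 1 ≤ s.length))
      = l.filter (fun s => decide (k + 1 ≤ s.length)) := by
  rw [List.filter_filter]
  apply List.filter_congr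
  intro s _
  rcases Nat.lt_or_ge s.length (k+1) with h | h <;> simp [h] <;> omega

lemma countP_filter_len (l : List (List Char)) (k : Nat) :
    ((l.filter (fun s => decide (k ≤ s.length))).countP (countedAt k) : Int)
      = (l.countP (countedAt k) : Int) := by
  rw [List.countP_filter]
  congr 1
  apply List.countP_congr
  intro s _
  constructor
  · intro h; simp only [Bool.and_eq_true, decide_eq_true_eq] at h; exact h.1
  · intro h
    have hlen : ¬ (s.length ≤ k) → True := fun _ => trivial
    by_cases hl : k ≤ s.length
    · simp [h, hl]
    · rw [countedAt_false_of_short k s (by omega)] at h; exact absurd h (by simp)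

-- ===== A's outer loop =====

lemma pyRange_neg (L : Nat) :
    PySem.List.pyRange (-1) (-(L : Int) - 1) (-1)
      = (List.range L).map (fun k : Nat => -1 - (k : Int)) := by
  unfold PySem.List.pyRange
  rw [if_neg (by norm_num)]
  by_cases hL : 0 < L
  · rw [if_neg (by norm_num), if_pos (by push_cast; omega)]
    have h1 : ((-1 : Int) - (-(L : Int) - 1) + -(-1) - 1) / -(-1) = (L : Int) := by
      ring_nf; omega
    rw [h1, Int.toNat_natCast]
    simp only [List.map_inj_left]
    intro k _
    ring
  · have hL0 : L = 0 := by omega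
    subst hL0
    rw [if_neg (by norm_num), if_neg (by norm_num)]
    simp

lemma inner_loop' (k : Nat) (L : List (List Char)) (c : Int) :
    L.foldl (fun (st : List (List Char) × Int) num =>
        if (-1 - (k : Int)) < -(num.length : Int) then
          ((PySem.List.remove? st.1 num).getD st.1, st.2)
        else if PySem.List.pyGet? num (-1 - (k : Int)) == some '1' then (st.1, st.2 + 1)
        else st) (L, c)
      = (L.filter (fun s => decide (k + 1 ≤ s.length)),
         c + (L.countP (countedAt k) : Int)) := by
  have h := inner_loop k L [] c (by intro d hd; simp at hd)
  simpa using h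

lemma outer_loop (Abin0 : List (List Char)) (k : Nat) :
    ((List.range k).map (fun j : Nat => -1 - (j : Int))).foldl
      (fun (st : List (List Char) × List (List Char) × Int) bitPos =>
        let r := checkCountForSpecificBit st.1 st.2.1 bitPos st.2.2
        (r.1, r.1, r.2)) (Abin0, Abin0, (0 : Int))
    = (Abin0.filter (fun s => decide (k ≤ s.length)),
       Abin0.filter (fun s => decide (k ≤ s.length)),
       (List.range k).foldl
         (fun mc p => if (Abin0.countP (countedAt p) : Int) > mc
                      then (Abin0.countP (countedAt p) : Int) else mc) 0) := by
  induction k with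
  | zero => simp
  | succ k ih =>
    rw [List.range_succ, List.map_append, List.foldl_append, ih]
    simp only [List.map_cons, List.map_nil, List.foldl_cons, List.foldl_nil]
    have hstep : checkCountForSpecificBit
        (Abin0.filter (fun s => decide (k ≤ s.length)))
        (Abin0.filter (fun s => decide (k ≤ s.length)))
        (-1 - (k : Int))
        ((List.range k).foldl
          (fun mc p => if (Abin0.countP (countedAt p) : Int) > mc
                       then (Abin0.countP (countedAt p) : Int) else mc) 0)
      = (Abin0.filter (fun s => decide (k + 1 ≤ s.length)),
         (List.range (k+1)).foldl
          (fun mc p => if (Abin0.countP (countedAt p) : Int) > mc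
                       then (Abin0.countP (countedAt p) : Int) else mc) 0) := by
      simp only [checkCountForSpecificBit]
      rw [inner_loop', filter_len_step, countP_filter_len Abin0 k]
      rw [List.range_succ, List.foldl_append, List.foldl_cons, List.foldl_nil]
      simp
    rw [hstep, List.range_succ]

lemma solution_eq_foldMax (A : List Int) (hA : A ≠ []) :
    ∃ N, solution A = foldMax A N ∧ (∀ p, N ≤ p → binCnt A p = 0) := by
  set As := PySem.List.sorted A (fun x => x) true with hAsdef
  have hperm : As.Perm A := PySem.List.sorted_perm A _ _
  have hAs : As ≠ [] := by
    intro h; exact hA ((PySem.List.sorted_eq_nil_iff A _ _).mp h)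
  have hAbin : decimalToBinary As = As.map PySem.Int.toBinChars := by
    unfold decimalToBinary
    rw [PySem.List.foldl_append_singleton_eq_map, List.nil_append]
  set Abin := As.map PySem.Int.toBinChars with hAbindef
  have hAbinne : Abin ≠ [] := by simpa [hAbindef] using hAs
  obtain ⟨mx, hmx⟩ : ∃ mx, PySem.List.max? Abin (fun s => s.length) = some mx := by
    cases hcase : PySem.List.max? Abin (fun s => s.length) with
    | none => exact absurd ((PySem.List.max?_eq_none_iff _ _).mp hcase) hAbinne
    | some mx => exact ⟨mx, rfl⟩
  have hcnt : ∀ p : Nat, (Abin.countP (countedAt p) : Int) = binCnt A p := by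
    intro p
    unfold binCnt
    congr 1
    rw [hAbindef, List.countP_map]
    have hcg := List.countP_congr (l := As)
      (p := countedAt p ∘ PySem.Int.toBinChars)
      (q := fun a : Int => a.natAbs.testBit p)
      (by intro x _; rw [Function.comp_apply, countedAt_toBinChars])
    rw [hcg]
    exact hperm.countP_eq _
  refine ⟨mx.length, ?_, ?_⟩
  · show solution A = foldMax A mx.length
    simp only [solution]
    rw [← hAsdef, hAbin, hmx]
    simp only [Option.map_some, Option.getD_some]
    rw [pyRange_neg, outer_loop]
    have hfun : (fun (mc : Int) (p : Nat) =>
        if (Abin.countP (countedAt p) : Int) > mc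
        then (Abin.countP (countedAt p) : Int) else mc)
        = (fun (mc : Int) (p : Nat) => max mc (binCnt A p)) := by
      funext mc p
      rw [hcnt p]
      rcases le_or_gt (binCnt A p) mc with h | h <;> simp [max_def] <;> omega
    rw [hfun]
    rfl
  · intro p hp
    unfold binCnt
    rw [List.countP_eq_zero.mpr, Nat.cast_zero]
    intro a ha
    have hmem : PySem.Int.toBinChars a ∈ Abin := by
      rw [hAbindef]
      exact List.mem_map_of_mem ((PySem.List.mem_sorted A _ _ a).mpr ha)
    have hlen := PySem.List.max?_isMax hmx _ hmem
    have hfalse := countedAt_false_of_short p (PySem.Int.toBinChars a) (by omega)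
    rw [countedAt_toBinChars] at hfalse
    simp [hfalse]

-- ===== the B side =====

lemma addBits_getD (v : Nat) : ∀ (d : PySem.Dict Int Int) (j t : Int),
    (solnAltAddBits d v j).getD t 0
      = d.getD t 0 + (if j ≤ t ∧ v.testBit (t - j).toNat then 1 else 0) := by
  induction v using Nat.strong_induction_on with
  | _ v ih =>
    intro d j t
    rw [solnAltAddBits]
    by_cases hv : v = 0
    · subst hv
      simp
    · rw [if_neg hv, ih (v >>> 1) (by
        simpa [Nat.shiftRight_one] using Nat.div_lt_self (Nat.pos_of_ne_zero hv) one_lt_two)]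
      have hmod : (if v &&& 1 = 1 then d.modify j 0 (· + 1) else d).getD t 0
          = d.getD t 0 + (if t = j ∧ v &&& 1 = 1 then 1 else 0) := by
        by_cases hb : v &&& 1 = 1
        · rw [if_pos hb, PySem.Dict.getD_modify]
          by_cases ht : t = j <;> simp [ht, hb]
        · rw [if_neg hb]
          simp only [Nat.and_one_is_mod] at hb
          simp [Nat.and_one_is_mod]
          intro _
          omega
      rw [hmod]
      have hand : v &&& 1 = v % 2 := Nat.and_one_is_mod v
      by_cases ht : t = j
      · subst ht
        have h0 : (t - t).toNat = 0 := by omega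
        have h1 : ¬ (t + 1 ≤ t) := by omega
        simp only [h0, h1, false_and, if_false, Nat.testBit_zero, le_refl, true_and]
        by_cases hb : v % 2 = 1
        · simp [hand, hb]
        · have h2 : v % 2 = 0 := by omega
          simp [hand, h2]
      · by_cases hgt : j + 1 ≤ t
        · have h2 : (t - (j + 1)).toNat + 1 = (t - j).toNat := by omega
          have h3 : j ≤ t := by omega
          have h4 : (v >>> 1).testBit (t - (j + 1)).toNat = v.testBit (t - j).toNat := by
            rw [← h2, Nat.testBit_succ, Nat.shiftRight_one]
          rw [h4]
          simp only [ht, false_and, if_false, hgt, true_and, h3]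
          ring
        · have h5 : ¬ (j ≤ t) := by omega
          simp [ht, hgt, h5]

lemma addBits_keys (v : Nat) : ∀ (d : PySem.Dict Int Int) (j t : Int),
    (t ∈ (solnAltAddBits d v j).keys ↔ t ∈ d.keys ∨ (j ≤ t ∧ v.testBit (t - j).toNat)) := by
  induction v using Nat.strong_induction_on with
  | _ v ih =>
    intro d j t
    rw [solnAltAddBits]
    by_cases hv : v = 0
    · subst hv
      simp
    · rw [if_neg hv, ih (v >>> 1) (by
        simpa [Nat.shiftRight_one] using Nat.div_lt_self (Nat.pos_of_ne_zero hv) one_lt_two)]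
      have hand : v &&& 1 = v % 2 := Nat.and_one_is_mod v
      have hmem : t ∈ (if v &&& 1 = 1 then d.modify j 0 (· + 1) else d).keys
          ↔ t ∈ d.keys ∨ (t = j ∧ v &&& 1 = 1) := by
        by_cases hb : v &&& 1 = 1
        · rw [if_pos hb]
          rw [show (d.modify j 0 (· + 1)).keys = (d.insert j (d.getD j 0 + 1)).keys from rfl]
          rw [PySem.Dict.mem_keys_insert]
          constructor
          · rintro (h | h)
            · exact Or.inr ⟨h, hb⟩
            · exact Or.inl h
          · rintro (h | ⟨h, _⟩)
            · exact Or.inr h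
            · exact Or.inl h
        · rw [if_neg hb]
          simp only [Nat.and_one_is_mod] at hb
          simp [Nat.and_one_is_mod]
          intro _ h
          omega
      rw [hmem]
      have hsplit : (j ≤ t ∧ v.testBit (t - j).toNat = true)
          ↔ ((t = j ∧ v &&& 1 = 1)
             ∨ (j + 1 ≤ t ∧ (v >>> 1).testBit (t - (j + 1)).toNat = true)) := by
        constructor
        · rintro ⟨hle, hbit⟩
          by_cases ht : t = j
          · subst ht
            left
            refine ⟨rfl, ?_⟩
            have h0 : (t - t).toNat = 0 := by omega
            rw [h0, Nat.testBit_zero] at hbit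
            simp only [decide_eq_true_eq] at hbit
            omega
          · right
            have hgt : j + 1 ≤ t := by omega
            have h2 : (t - (j + 1)).toNat + 1 = (t - j).toNat := by omega
            refine ⟨hgt, ?_⟩
            rw [← h2, Nat.testBit_succ] at hbit
            rwa [Nat.shiftRight_one]
        · rintro (⟨rfl, hb⟩ | ⟨hgt, hbit⟩)
          · refine ⟨le_refl _, ?_⟩
            have h0 : (t - t).toNat = 0 := by omega
            rw [h0, Nat.testBit_zero]
            simp only [decide_eq_true_eq]
            omega
          · refine ⟨by omega, ?_⟩
            have h2 : (t - (j + 1)).toNat + 1 = (t - j).toNat := by omega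
            rw [← h2, Nat.testBit_succ]
            rwa [Nat.shiftRight_one] at hbit
      rw [hsplit]
      tauto

lemma addBits_nodup (v : Nat) : ∀ (d : PySem.Dict Int Int) (j : Int),
    d.keys.Nodup → (solnAltAddBits d v j).keys.Nodup := by
  induction v using Nat.strong_induction_on with
  | _ v ih =>
    intro d j hnd
    rw [solnAltAddBits]
    by_cases hv : v = 0
    · simpa [hv]
    · rw [if_neg hv]
      apply ih (v >>> 1) (by
        simpa [Nat.shiftRight_one] using Nat.div_lt_self (Nat.pos_of_ne_zero hv) one_lt_two)
      by_cases hb : v &&& 1 = 1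
      · rw [if_pos hb]
        rw [show (d.modify j 0 (· + 1)) = d.insert j (d.getD j 0 + 1) from rfl]
        by_cases hc : d.contains j
        · rwa [PySem.Dict.keys_insert_of_contains _ _ hc]
        · rw [PySem.Dict.keys_insert_of_not_contains _ _ (by simpa using hc)]
          rw [List.nodup_append]
          refine ⟨hnd, List.nodup_singleton j, ?_⟩
          intro x hx y hy
          have hyj : y = j := by simpa using hy
          intro hxy
          rw [hxy, hyj] at hx
          have hcj : j ∉ d.keys := by
            simpa [PySem.Dict.contains_iff_mem_keys] using hc
          exact hcj hx
      · rwa [if_neg hb]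

/-- per-bit count, indexed by an Int position (negative positions count nothing) -/
def bcnt (A : List Int) (t : Int) : Int :=
  (A.countP (fun a => decide (0 ≤ t) && a.natAbs.testBit t.toNat) : Int)

lemma fold_getD (A : List Int) : ∀ (d : PySem.Dict Int Int) (t : Int),
    (A.foldl (fun d num => solnAltAddBits d num.natAbs 0) d).getD t 0
      = d.getD t 0 + bcnt A t := by
  induction A with
  | nil => intro d t; simp [bcnt]
  | cons a A ih =>
    intro d t
    rw [List.foldl_cons, ih, addBits_getD]
    unfold bcnt
    rw [List.countP_cons]
    simp only [sub_zero]
    by_cases h0 : 0 ≤ t <;> by_cases hbit : a.natAbs.testBit t.toNat = true <;>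
      simp [h0, hbit] <;> push_cast <;> ring

lemma fold_keys (A : List Int) : ∀ (d : PySem.Dict Int Int) (t : Int),
    (t ∈ (A.foldl (fun d num => solnAltAddBits d num.natAbs 0) d).keys
      ↔ t ∈ d.keys ∨ bcnt A t ≠ 0) := by
  induction A with
  | nil => intro d t; simp [bcnt]
  | cons a A ih =>
    intro d t
    rw [List.foldl_cons, ih, addBits_keys]
    have hsplit : bcnt (a :: A) t ≠ 0
        ↔ ((decide (0 ≤ t) && a.natAbs.testBit t.toNat) = true ∨ bcnt A t ≠ 0) := by
      unfold bcnt
      rw [List.countP_cons]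
      by_cases hb : (decide (0 ≤ t) && a.natAbs.testBit t.toNat) = true <;>
        simp [hb] <;> omega
    rw [hsplit]
    have hcond : (0 ≤ t ∧ a.natAbs.testBit (t - 0).toNat = true)
        ↔ (decide (0 ≤ t) && a.natAbs.testBit t.toNat) = true := by
      simp only [sub_zero]
      simp
    rw [hcond]
    tauto

lemma fold_nodup (A : List Int) : ∀ (d : PySem.Dict Int Int),
    d.keys.Nodup → (A.foldl (fun d num => solnAltAddBits d num.natAbs 0) d).keys.Nodup := by
  induction A with
  | nil => intro d h; exact h
  | cons a A ih => intro d h; exact ih _ (addBits_nodup _ _ _ h)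

lemma bcnt_cast (A : List Int) (p : Nat) : bcnt A (p : Int) = binCnt A p := by
  simp [bcnt, binCnt]

lemma dom_natAbs (A : List Int) (hDom : Dom_solution A) :
    ∀ a ∈ A, a.natAbs < 2 ^ 32 := by
  intro a ha
  unfold Dom_solution at hDom
  rw [List.all_eq_true] at hDom
  have := hDom a ha
  simp only [pvDomInt, decide_eq_true_eq] at this
  omega

lemma bcnt_bound (A : List Int) (hDom : Dom_solution A) (t : Int)
    (h : bcnt A t ≠ 0) : 0 ≤ t ∧ t < 32 := by
  unfold bcnt at h
  have hpos : 0 < A.countP (fun a => decide (0 ≤ t) && a.natAbs.testBit t.toNat) := by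
    by_contra hc
    exact h (by omega)
  obtain ⟨a, ha, hpa⟩ := List.countP_pos_iff.mp hpos
  simp only [Bool.and_eq_true, decide_eq_true_eq] at hpa
  obtain ⟨h0, hbit⟩ := hpa
  refine ⟨h0, ?_⟩
  by_contra hge
  have h32 : 32 ≤ t.toNat := by omega
  have : a.natAbs.testBit t.toNat = false := by
    apply Nat.testBit_lt_two_pow
    calc a.natAbs < 2 ^ 32 := dom_natAbs A hDom a ha
      _ ≤ 2 ^ t.toNat := Nat.pow_le_pow_right (by omega) h32
  rw [this] at hbit
  exact Bool.false_ne_true hbit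

lemma binCnt_32 (A : List Int) (hDom : Dom_solution A) (p : Nat) (hp : 32 ≤ p) :
    binCnt A p = 0 := by
  unfold binCnt
  rw [List.countP_eq_zero.mpr, Nat.cast_zero]
  intro a ha
  simp only [Bool.not_eq_true]
  apply Nat.testBit_lt_two_pow
  calc a.natAbs < 2 ^ 32 := dom_natAbs A hDom a ha
    _ ≤ 2 ^ p := Nat.pow_le_pow_right (by omega) hp

lemma solution_alt_eq_foldMax (A : List Int) (hDom : Dom_solution A) :
    solution_alt A = foldMax A 32 := by
  have hgoal : solution_alt A
      = PySem.List.maxD ((A.foldl (fun d num => solnAltAddBits d num.natAbs 0)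
          PySem.Dict.empty).values) (fun x => x) 0 := rfl
  rw [hgoal]
  set d := A.foldl (fun d num => solnAltAddBits d num.natAbs 0) PySem.Dict.empty with hd
  have hg : ∀ t : Int, d.getD t 0 = bcnt A t := by
    intro t
    rw [hd, fold_getD]
    simp [PySem.Dict.getD_empty]
  have hk : ∀ t : Int, t ∈ d.keys ↔ bcnt A t ≠ 0 := by
    intro t
    rw [hd, fold_keys]
    simp [PySem.Dict.keys_empty]
  have hnd : d.keys.Nodup := by
    rw [hd]
    exact fold_nodup A _ (by simp [PySem.Dict.keys_empty])
  have hvals : d.values = d.keys.map (fun k => d.getD k 0) :=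
    PySem.Dict.values_eq_map_keys d hnd 0
  have hval_mem : ∀ w ∈ d.values, ∃ p : Nat, p < 32 ∧ w = binCnt A p := by
    intro w hw
    rw [hvals] at hw
    obtain ⟨k, hkmem, rfl⟩ := List.mem_map.mp hw
    have hne := (hk k).mp hkmem
    obtain ⟨h0, h32⟩ := bcnt_bound A hDom k hne
    refine ⟨k.toNat, by omega, ?_⟩
    rw [hg k]
    have hkeq : k = ((k.toNat : Nat) : Int) := by omega
    conv_lhs => rw [hkeq]
    rw [bcnt_cast]
  cases hv : d.values with
  | nil =>
    rw [PySem.List.maxD_nil]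
    have hkeys : d.keys = [] := by
      have := hvals
      rw [hv] at this
      exact List.map_eq_nil_iff.mp this.symm
    have hzero : ∀ p : Nat, binCnt A p = 0 := by
      intro p
      rw [← bcnt_cast]
      by_contra hne
      have : ((p : Int)) ∈ d.keys := (hk _).mpr hne
      rw [hkeys] at this
      exact absurd this (List.not_mem_nil)
    exact (le_antisymm (foldMax_le A 32 0 le_rfl (fun p _ => le_of_eq (hzero p))) (foldMax_nonneg A 32)).symm
  | cons v vs =>
    rw [PySem.List.maxD_id_cons]
    have hvmem : ∀ w, w = v ∨ w ∈ vs → w ∈ d.values := by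
      intro w hw
      rw [hv]
      rcases hw with rfl | hw
      · exact List.mem_cons_self
      · exact List.mem_cons_of_mem _ hw
    have hM0 : (0 : Int) ≤ vs.foldl max v := by
      obtain ⟨p, _, hvp⟩ := hval_mem v (hvmem v (Or.inl rfl))
      calc (0 : Int) ≤ v := hvp ▸ binCnt_nonneg A p
        _ ≤ vs.foldl max v := (PySem.List.le_foldl_max vs v).1
    apply le_antisymm
    · -- the dict max is one of the values, each of which is some binCnt below 32
      rcases PySem.List.foldl_max_mem vs v with hm | hm
      · obtain ⟨p, hp32, hvp⟩ := hval_mem (vs.foldl max v) (hvmem _ (Or.inl hm))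
        rw [hvp]
        exact le_foldMax A 32 p hp32
      · obtain ⟨p, hp32, hvp⟩ := hval_mem _ (hvmem _ (Or.inr hm))
        rw [hvp]
        exact le_foldMax A 32 p hp32
    · -- every binCnt below 32 is 0 or a dict value, hence at most the dict max
      apply foldMax_le A 32 _ hM0
      intro p hp
      by_cases hz : binCnt A p = 0
      · rw [hz]; exact hM0
      · have hkey : ((p : Int)) ∈ d.keys := (hk _).mpr (by rwa [bcnt_cast])
        have hwval : binCnt A p ∈ d.values := by
          rw [hvals]
          refine List.mem_map.mpr ⟨(p : Int), hkey, ?_⟩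
          rw [hg, bcnt_cast]
        rw [hv] at hwval
        rcases List.mem_cons.mp hwval with he | he
        · rw [he]
          exact (PySem.List.le_foldl_max vs v).1
        · exact (PySem.List.le_foldl_max vs v).2 _ he

-- ===== VERDICT (by name: the statement is the Claim_ definition above) =====
theorem solution_spec : Claim_equal_solution := by
  intro A hDom hPre
  unfold Spec_solution
  obtain ⟨N, hN, hz⟩ := solution_eq_foldMax A hPre
  rw [hN, solution_alt_eq_foldMax A hDom]
  rcases Nat.le_total N 32 with h | h
  · rw [foldMax_ext A N 32 h hz]
  · rw [foldMax_ext A 32 N h (fun p hp => binCnt_32 A hDom p hp)]
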